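-- pv_equiv track=rewrite | github.com/warlock-spell/FundConnect | accounts/calculations/helper_functions.py | get_days_left_in_financial_year
-- ===== SOURCE A (Python) =====
-- def get_financial_year(month: int, year: int) -> str:
--     months_of_prev_financial_year = [1, 2, 3, '01', '02', '03', '1', '2', '3']
--     return (
--         f"{int(str(year)[:4]) - 1}-{str(year)[2:]}"
--         if month in months_of_prev_financial_year
--         else f"{str(year)[:4]}-{int(str(year)[2:]) + 1}"
--     )
--
-- month_days = {
--     "1": 31,
--     "2": 28,
--     "3": 31,
--     "4": 30,
--     "5": 31,
--     "6": 30,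
--     "7": 31,
--     "8": 31,
--     "9": 30,
--     "10": 31,
--     "11": 30,
--     "12": 31,
-- }
--
-- def get_days_left_in_financial_year(date: int, month: int, year: int) -> int:
--     financial_year = get_financial_year(month, year)
--     # total days left from current date to 31st March
--     # days left in current month
--     days_left = 0 if date == 29 and month == 2 else month_days[str(month)] - date + 1
--     months_index = [4, 5, 6, 7, 8, 9, 10, 11, 12, 1, 2, 3]
--     current_month_index = months_index.index(month)
--     # days in remaining months
--     for month in range(current_month_index + 1, len(months_index)):
--         days_left += month_days[str(months_index[month])]
--     return int(days_left)
-- ===== SOURCE B (Python) =====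
-- def get_financial_year(month: int, year: int) -> str:
--     months_of_prev_financial_year = [1, 2, 3, '01', '02', '03', '1', '2', '3']
--     return (
--         f"{int(str(year)[:4]) - 1}-{str(year)[2:]}"
--         if month in months_of_prev_financial_year
--         else f"{str(year)[:4]}-{int(str(year)[2:]) + 1}"
--     )
--
-- month_days = {
--     "1": 31, "2": 28, "3": 31, "4": 30, "5": 31, "6": 30,
--     "7": 31, "8": 31, "9": 30, "10": 31, "11": 30, "12": 31,
-- }
--
-- def get_days_left_in_financial_year(date: int, month: int, year: int) -> int:
--     get_financial_year(month, year)  # kept: validates the year exactly as before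
--     fiscal_order = [4, 5, 6, 7, 8, 9, 10, 11, 12, 1, 2, 3]
--     # closed-form complement: the 12 month lengths sum to 365, so
--     # days left = 365 - (days elapsed in earlier FY months) - (date - 1)
--     elapsed = sum(month_days[str(m)] for m in fiscal_order[:fiscal_order.index(month)])
--     return 366 - date - elapsed
-- ===== Notes on version B (the rewrite author's own statement) =====
-- stated objective: simpler
-- what changed: Replaces the current-month branch (with its Feb-29 special case) plus the remaining-months accumulation loop by a single closed-form complement: sum the FY-order months strictly before the current month and return 366 - date - elapsed (the Feb-29 case coincides with the plain formula).
import Mathlib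
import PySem

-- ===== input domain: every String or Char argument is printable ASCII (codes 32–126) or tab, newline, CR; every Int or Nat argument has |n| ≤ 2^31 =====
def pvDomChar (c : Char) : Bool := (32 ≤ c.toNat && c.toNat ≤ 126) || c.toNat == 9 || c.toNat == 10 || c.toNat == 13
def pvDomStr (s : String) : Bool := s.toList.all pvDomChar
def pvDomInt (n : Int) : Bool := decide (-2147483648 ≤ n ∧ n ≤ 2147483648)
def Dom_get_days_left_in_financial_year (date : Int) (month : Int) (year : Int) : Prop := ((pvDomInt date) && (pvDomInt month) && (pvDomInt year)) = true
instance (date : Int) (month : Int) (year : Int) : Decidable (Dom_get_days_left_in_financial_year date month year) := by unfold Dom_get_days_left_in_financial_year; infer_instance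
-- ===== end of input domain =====

-- B replaces A's Feb-29 branch plus remaining-months accumulation loop by the closed-form
-- complement 366 - date - (days of earlier FY months); equal wherever A returns.

-- ===== PORT A =====
-- get_financial_year: its value is unused, but it raises ValueError for short years (none here).
-- Strings are ported as List Char (PySem.Chars side).
def month_days_port : PySem.Dict String Int := PySem.Dict.ofList
  [("1", 31), ("2", 28), ("3", 31), ("4", 30), ("5", 31), ("6", 30),
   ("7", 31), ("8", 31), ("9", 30), ("10", 31), ("11", 30), ("12", 31)]

def get_financial_year_port (month : Int) (year : Int) : Option (List Char) :=
  -- 'month in [1, 2, 3, '01', '02', '03', '1', '2', '3']': an int argument can only equal the int elements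
  if month ∈ ([1, 2, 3] : List Int) then
    match PySem.Int.ofChars? (PySem.List.slice (PySem.Int.toChars year) none (some 4)) with
    | none => none
    | some v => some (PySem.Int.toChars (v - 1) ++ ['-'] ++ PySem.List.slice (PySem.Int.toChars year) (some 2) none)
  else
    match PySem.Int.ofChars? (PySem.List.slice (PySem.Int.toChars year) (some 2) none) with
    | none => none
    | some v => some (PySem.List.slice (PySem.Int.toChars year) none (some 4) ++ ['-'] ++ PySem.Int.toChars (v + 1))

def get_days_left_in_financial_year (date : Int) (month : Int) (year : Int) : Int :=
  match get_financial_year_port month year with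
  | none => 0  -- ValueError in Python; excluded by Pre_
  | some _ =>
    match PySem.Dict.get? month_days_port (PySem.Int.toStr month) with
    | none => 0  -- KeyError in Python; excluded by Pre_
    | some md =>
      let days_left : Int := if date = 29 ∧ month = 2 then 0 else md - date + 1
      let months_index : List Int := [4, 5, 6, 7, 8, 9, 10, 11, 12, 1, 2, 3]
      match PySem.List.index? months_index month with
      | none => 0  -- ValueError; unreachable once the dict lookup succeeded
      | some ci =>
        -- for month in range(ci+1, 12): days_left += month_days[str(months_index[month])]
        -- (getD defaults are never taken: the index and key are always in range here)
        (PySem.List.pyRange ((ci : Int) + 1) 12 1).foldl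
          (fun acc i =>
            acc + PySem.Dict.getD month_days_port (PySem.Int.toStr (PySem.List.pyGetD months_index i 0)) 0)
          days_left

-- ===== PORT B =====
def get_days_left_in_financial_year_alt (date : Int) (month : Int) (year : Int) : Int :=
  match get_financial_year_port month year with
  | none => 0  -- ValueError in Python; excluded by Pre_
  | some _ =>
    let fiscal_order : List Int := [4, 5, 6, 7, 8, 9, 10, 11, 12, 1, 2, 3]
    match PySem.List.index? fiscal_order month with
    | none => 0  -- ValueError in Python; excluded by Pre_
    | some i =>
      -- elapsed = sum(month_days[str(m)] for m in fiscal_order[:i])  (keys always present here)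
      let elapsed : Int :=
        ((PySem.List.slice fiscal_order none (some (i : Int))).map
          (fun m => PySem.Dict.getD month_days_port (PySem.Int.toStr m) 0)).sum
      366 - date - elapsed

-- ===== PRECONDITION & SPEC =====
-- Pre_ = exactly where Python A returns: month must be a real month (else KeyError / ValueError),
-- and for months 4..12 str(year)[2:] must be a nonempty int literal (else ValueError), i.e. |year| has ≥ 3 digits.
def Pre_get_days_left_in_financial_year (_date : Int) (month : Int) (year : Int) : Prop :=
  (1 ≤ month ∧ month ≤ 12) ∧ (month ≤ 3 ∨ year ≤ -10 ∨ 100 ≤ year)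
instance (date : Int) (month : Int) (year : Int) : Decidable (Pre_get_days_left_in_financial_year date month year) := by unfold Pre_get_days_left_in_financial_year; infer_instance

def pvWitness_get_days_left_in_financial_year : Int × Int × Int := (15, 7, 2023)

def Spec_get_days_left_in_financial_year (date : Int) (month : Int) (year : Int) (out : Int) : Prop := out = get_days_left_in_financial_year_alt date month year
instance (date : Int) (month : Int) (year : Int) (out : Int) : Decidable (Spec_get_days_left_in_financial_year date month year out) := by unfold Spec_get_days_left_in_financial_year; infer_instance

-- ===== CLAIM (what is proved, stated in full; the proofs are below) =====
def Claim_equal_get_days_left_in_financial_year : Prop := ∀ (date : Int) (month : Int) (year : Int), Dom_get_days_left_in_financial_year date month year → Pre_get_days_left_in_financial_year date month year → Spec_get_days_left_in_financial_year date month year (get_days_left_in_financial_year date month year)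

-- ===== LEMMAS AND PROOFS =====

-- ===== VERDICT (by name: the statement is the Claim_ definition above) =====
theorem get_days_left_in_financial_year_spec : Claim_equal_get_days_left_in_financial_year := by
  intro date month year _ hpre
  unfold Spec_get_days_left_in_financial_year
  obtain ⟨⟨h1, h2⟩, _⟩ := hpre
  cases hgf : get_financial_year_port month year with
  | none => simp [get_days_left_in_financial_year, get_days_left_in_financial_year_alt, hgf]
  | some s =>
    interval_cases month
    · simp only [get_days_left_in_financial_year, get_days_left_in_financial_year_alt, hgf,
        show PySem.Dict.get? month_days_port (PySem.Int.toStr 1) = some 31 from rfl,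
        show PySem.List.index? ([4, 5, 6, 7, 8, 9, 10, 11, 12, 1, 2, 3] : List Int) (1 : Int) = some 9 from rfl]
      rw [PySem.List.foldl_add]
      show (if date = 29 ∧ (1:Int) = 2 then (0:Int) else 31 - date + 1) + 59 = 366 - date - 275
      split_ifs <;> omega
    · simp only [get_days_left_in_financial_year, get_days_left_in_financial_year_alt, hgf,
        show PySem.Dict.get? month_days_port (PySem.Int.toStr 2) = some 28 from rfl,
        show PySem.List.index? ([4, 5, 6, 7, 8, 9, 10, 11, 12, 1, 2, 3] : List Int) (2 : Int) = some 10 from rfl]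
      rw [PySem.List.foldl_add]
      show (if date = 29 ∧ True then (0:Int) else 28 - date + 1) + 31 = 366 - date - 306
      split_ifs <;> omega
    · simp only [get_days_left_in_financial_year, get_days_left_in_financial_year_alt, hgf,
        show PySem.Dict.get? month_days_port (PySem.Int.toStr 3) = some 31 from rfl,
        show PySem.List.index? ([4, 5, 6, 7, 8, 9, 10, 11, 12, 1, 2, 3] : List Int) (3 : Int) = some 11 from rfl]
      rw [PySem.List.foldl_add]
      show (if date = 29 ∧ (3:Int) = 2 then (0:Int) else 31 - date + 1) + 0 = 366 - date - 334
      split_ifs <;> omega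
    · simp only [get_days_left_in_financial_year, get_days_left_in_financial_year_alt, hgf,
        show PySem.Dict.get? month_days_port (PySem.Int.toStr 4) = some 30 from rfl,
        show PySem.List.index? ([4, 5, 6, 7, 8, 9, 10, 11, 12, 1, 2, 3] : List Int) (4 : Int) = some 0 from rfl]
      rw [PySem.List.foldl_add]
      show (if date = 29 ∧ (4:Int) = 2 then (0:Int) else 30 - date + 1) + 335 = 366 - date - 0
      split_ifs <;> omega
    · simp only [get_days_left_in_financial_year, get_days_left_in_financial_year_alt, hgf,
        show PySem.Dict.get? month_days_port (PySem.Int.toStr 5) = some 31 from rfl,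
        show PySem.List.index? ([4, 5, 6, 7, 8, 9, 10, 11, 12, 1, 2, 3] : List Int) (5 : Int) = some 1 from rfl]
      rw [PySem.List.foldl_add]
      show (if date = 29 ∧ (5:Int) = 2 then (0:Int) else 31 - date + 1) + 304 = 366 - date - 30
      split_ifs <;> omega
    · simp only [get_days_left_in_financial_year, get_days_left_in_financial_year_alt, hgf,
        show PySem.Dict.get? month_days_port (PySem.Int.toStr 6) = some 30 from rfl,
        show PySem.List.index? ([4, 5, 6, 7, 8, 9, 10, 11, 12, 1, 2, 3] : List Int) (6 : Int) = some 2 from rfl]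
      rw [PySem.List.foldl_add]
      show (if date = 29 ∧ (6:Int) = 2 then (0:Int) else 30 - date + 1) + 274 = 366 - date - 61
      split_ifs <;> omega
    · simp only [get_days_left_in_financial_year, get_days_left_in_financial_year_alt, hgf,
        show PySem.Dict.get? month_days_port (PySem.Int.toStr 7) = some 31 from rfl,
        show PySem.List.index? ([4, 5, 6, 7, 8, 9, 10, 11, 12, 1, 2, 3] : List Int) (7 : Int) = some 3 from rfl]
      rw [PySem.List.foldl_add]
      show (if date = 29 ∧ (7:Int) = 2 then (0:Int) else 31 - date + 1) + 243 = 366 - date - 91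
      split_ifs <;> omega
    · simp only [get_days_left_in_financial_year, get_days_left_in_financial_year_alt, hgf,
        show PySem.Dict.get? month_days_port (PySem.Int.toStr 8) = some 31 from rfl,
        show PySem.List.index? ([4, 5, 6, 7, 8, 9, 10, 11, 12, 1, 2, 3] : List Int) (8 : Int) = some 4 from rfl]
      rw [PySem.List.foldl_add]
      show (if date = 29 ∧ (8:Int) = 2 then (0:Int) else 31 - date + 1) + 212 = 366 - date - 122
      split_ifs <;> omega
    · simp only [get_days_left_in_financial_year, get_days_left_in_financial_year_alt, hgf,
        show PySem.Dict.get? month_days_port (PySem.Int.toStr 9) = some 30 from rfl,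
        show PySem.List.index? ([4, 5, 6, 7, 8, 9, 10, 11, 12, 1, 2, 3] : List Int) (9 : Int) = some 5 from rfl]
      rw [PySem.List.foldl_add]
      show (if date = 29 ∧ (9:Int) = 2 then (0:Int) else 30 - date + 1) + 182 = 366 - date - 153
      split_ifs <;> omega
    · simp only [get_days_left_in_financial_year, get_days_left_in_financial_year_alt, hgf,
        show PySem.Dict.get? month_days_port (PySem.Int.toStr 10) = some 31 from rfl,
        show PySem.List.index? ([4, 5, 6, 7, 8, 9, 10, 11, 12, 1, 2, 3] : List Int) (10 : Int) = some 6 from rfl]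
      rw [PySem.List.foldl_add]
      show (if date = 29 ∧ (10:Int) = 2 then (0:Int) else 31 - date + 1) + 151 = 366 - date - 183
      split_ifs <;> omega
    · simp only [get_days_left_in_financial_year, get_days_left_in_financial_year_alt, hgf,
        show PySem.Dict.get? month_days_port (PySem.Int.toStr 11) = some 30 from rfl,
        show PySem.List.index? ([4, 5, 6, 7, 8, 9, 10, 11, 12, 1, 2, 3] : List Int) (11 : Int) = some 7 from rfl]
      rw [PySem.List.foldl_add]
      show (if date = 29 ∧ (11:Int) = 2 then (0:Int) else 30 - date + 1) + 121 = 366 - date - 214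
      split_ifs <;> omega
    · simp only [get_days_left_in_financial_year, get_days_left_in_financial_year_alt, hgf,
        show PySem.Dict.get? month_days_port (PySem.Int.toStr 12) = some 31 from rfl,
        show PySem.List.index? ([4, 5, 6, 7, 8, 9, 10, 11, 12, 1, 2, 3] : List Int) (12 : Int) = some 8 from rfl]
      rw [PySem.List.foldl_add]
      show (if date = 29 ∧ (12:Int) = 2 then (0:Int) else 31 - date + 1) + 90 = 366 - date - 244
      split_ifs <;> omega
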